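-- pv_equiv track=rewrite | github.com/loziska/SchoolOlimp | block2/task9.py | max_segments_cover
-- ===== SOURCE A (Python) =====
-- def max_segments_cover(segments):
--     events = []
--     for l, r in segments:
--         events.append((l, 1))   # Начало отрезка
--         events.append((r, -1))  # Конец отрезка
--
--     # Сортируем: сначала по координате, затем по типу события (начала (+1) раньше, чем концы (-1))
--     events.sort(key=lambda x: (x[0], -x[1]))
--
--     max_count = 0
--     current_count = 0
--     best_point = None
--
--     for point, change in events:
--         current_count += change
--         if current_count > max_count:
--             max_count = current_count
--             best_point = point  # Запоминаем лучшую точку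
--
--     return best_point, max_count
-- ===== SOURCE B (Python) =====
-- def max_segments_cover(segments):
--     def active(x):
--         c = 0
--         for l, r in segments:
--             if l <= x:
--                 c += 1
--             if r < x:
--                 c -= 1
--         return c
--
--     best_point = None
--     max_count = 0
--     for l, _ in segments:
--         c = active(l)
--         if c > max_count:
--             best_point = l
--             max_count = c
--         elif c == max_count and best_point is not None and l < best_point:
--             best_point = l
--     return best_point, max_count
-- ===== Notes on version B (the rewrite author's own statement) =====
-- stated objective: alternative
-- what changed: Replaces the sort-based event sweep by a direct quadratic scan: for each left endpoint x it counts segments started by x minus segments ended before x (the sweep's active count at x, equal to inclusive coverage for well-formed segments), keeping the maximum and the smallest coordinate achieving it.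
import Mathlib
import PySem

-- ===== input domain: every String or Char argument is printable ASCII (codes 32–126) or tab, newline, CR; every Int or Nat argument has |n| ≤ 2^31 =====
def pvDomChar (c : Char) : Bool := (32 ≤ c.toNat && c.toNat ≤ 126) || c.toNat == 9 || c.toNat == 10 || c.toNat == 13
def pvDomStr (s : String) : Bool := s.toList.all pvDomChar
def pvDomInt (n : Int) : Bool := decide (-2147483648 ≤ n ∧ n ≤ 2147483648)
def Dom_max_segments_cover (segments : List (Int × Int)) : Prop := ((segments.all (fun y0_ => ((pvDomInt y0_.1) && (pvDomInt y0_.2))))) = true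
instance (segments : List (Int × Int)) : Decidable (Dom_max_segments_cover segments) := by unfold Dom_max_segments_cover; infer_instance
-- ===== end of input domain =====

-- B replaces the sorted event sweep by a direct quadratic scan over left endpoints (alternative
-- algorithm of the same result, not faster): for each left endpoint x it counts segments started
-- by x minus segments ended before x and keeps the maximum with the smallest such x.

-- ===== PORT A =====
def max_segments_cover (segments : List (Int × Int)) : Option Int × Int :=
  -- events.append((l, 1)); events.append((r, -1))
  let events := segments.foldl (fun acc lr => acc ++ [(lr.1, (1 : Int)), (lr.2, (-1 : Int))]) []
  -- events.sort(key=lambda x: (x[0], -x[1]))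
  let events := PySem.List.sorted2 events (fun e => e.1) (fun e => -e.2)
  -- state (max_count, current_count, best_point)
  let st := events.foldl
    (fun (st : Int × Int × Option Int) e =>
      let cur := st.2.1 + e.2
      if cur > st.1 then (cur, cur, some e.1) else (st.1, cur, st.2.2))
    (0, 0, none)
  (st.2.2, st.1)

-- ===== PORT B =====
-- helper `active` of Source B: segments started by x minus segments ended before x
def pvActiveB (segments : List (Int × Int)) (x : Int) : Int :=
  segments.foldl
    (fun c q =>
      let c1 := if q.1 ≤ x then c + 1 else c
      if q.2 < x then c1 - 1 else c1)
    0

def max_segments_cover_alt (segments : List (Int × Int)) : Option Int × Int :=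
  segments.foldl
    (fun (st : Option Int × Int) q =>
      let c := pvActiveB segments q.1
      if c > st.2 then (some q.1, c)
      else
        match st.1 with
        | some bp => if c = st.2 ∧ q.1 < bp then (some q.1, st.2) else st
        | none => st)
    (none, 0)

-- ===== PRECONDITION & SPEC =====
def Spec_max_segments_cover (segments : List (Int × Int)) (out : Option Int × Int) : Prop := out = max_segments_cover_alt segments
instance (segments : List (Int × Int)) (out : Option Int × Int) : Decidable (Spec_max_segments_cover segments out) := by unfold Spec_max_segments_cover; infer_instance

-- ===== CLAIM (what is proved, stated in full; the proofs are below) =====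
def Claim_equal_max_segments_cover : Prop := ∀ (segments : List (Int × Int)), Dom_max_segments_cover segments → Spec_max_segments_cover segments (max_segments_cover segments)

-- ===== LEMMAS AND PROOFS =====

-- Python's comparison `(a.1, -a.2) < (b.1, -b.2)` as sorted2 instantiates it
def evLt (a b : Int × Int) : Bool :=
  decide (a.1 < b.1) || (!decide (b.1 < a.1) && decide (-a.2 < -b.2))

def evLe (a b : Int × Int) : Prop := evLt b a = false

-- event-list counting: starts with coordinate ≤ x, minus ends with coordinate < x
def actE (es : List (Int × Int)) (x : Int) : Int :=
  (es.countP (fun e => decide (e.2 = 1 ∧ e.1 ≤ x)) : Int)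
    - (es.countP (fun e => decide (e.2 = -1 ∧ e.1 < x)) : Int)

def isStart (es : List (Int × Int)) (x : Int) : Prop := ((x, (1 : Int)) ∈ es)

def psum (es : List (Int × Int)) : Int := (es.map Prod.snd).sum

-- segment-level count: segments with left endpoint ≤ x minus segments with right endpoint < x
def act (segs : List (Int × Int)) (x : Int) : Int :=
  (segs.countP (fun q => decide (q.1 ≤ x)) : Int) - (segs.countP (fun q => decide (q.2 < x)) : Int)

def evOf (segs : List (Int × Int)) : List (Int × Int) :=
  segs.flatMap (fun q => [(q.1, (1 : Int)), (q.2, (-1 : Int))])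

-- the common characterisation of both results
def CharRes (segs : List (Int × Int)) (b : Option Int) (m : Int) : Prop :=
  0 ≤ m ∧ (∀ q ∈ segs, act segs q.1 ≤ m) ∧
    ((m = 0 ∧ b = none) ∨
      (0 < m ∧ ∃ x, b = some x ∧ (∃ q ∈ segs, q.1 = x) ∧ act segs x = m ∧
        ∀ q ∈ segs, act segs q.1 = m → x ≤ q.1))

lemma CharRes_unique {segs b1 m1 b2 m2} (h1 : CharRes segs b1 m1) (h2 : CharRes segs b2 m2) :
    b1 = b2 ∧ m1 = m2 := by
  obtain ⟨hm1, hb1, hc1⟩ := h1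
  obtain ⟨hm2, hb2, hc2⟩ := h2
  rcases hc1 with ⟨hz1, hn1⟩ | ⟨hp1, x1, hx1, ⟨q1, hq1, hq1e⟩, ha1, hmin1⟩ <;>
    rcases hc2 with ⟨hz2, hn2⟩ | ⟨hp2, x2, hx2, ⟨q2, hq2, hq2e⟩, ha2, hmin2⟩
  · exact ⟨hn1.trans hn2.symm, hz1.trans hz2.symm⟩
  · exfalso; have := hb1 q2 hq2; rw [hq2e, ha2] at this; omega
  · exfalso; have := hb2 q1 hq1; rw [hq1e, ha1] at this; omega
  · have e1 : act segs x1 ≤ m2 := by have := hb2 q1 hq1; rwa [hq1e] at this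
    have e2 : act segs x2 ≤ m1 := by have := hb1 q2 hq2; rwa [hq2e] at this
    have hm : m1 = m2 := by omega
    subst hm
    have l1 : x1 ≤ x2 := hq2e ▸ hmin1 q2 hq2 (by rw [hq2e]; exact ha2)
    have l2 : x2 ≤ x1 := hq1e ▸ hmin2 q1 hq1 (by rw [hq1e]; exact ha1)
    have : x1 = x2 := le_antisymm l1 l2
    subst this
    exact ⟨hx1.trans hx2.symm, rfl⟩

-- ---------- basic counting lemmas ----------

lemma act_cons (q : Int × Int) (t : List (Int × Int)) (x : Int) :
    act (q :: t) x = ((if q.1 ≤ x then 1 else 0) - (if q.2 < x then 1 else 0)) + act t x := by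
  unfold act
  simp only [List.countP_cons]
  push_cast
  split_ifs <;> simp_all <;> omega

lemma pvActiveB_go (x : Int) :
    ∀ (segs : List (Int × Int)) (c : Int),
      segs.foldl (fun c q =>
        let c1 := if q.1 ≤ x then c + 1 else c
        if q.2 < x then c1 - 1 else c1) c = c + act segs x := by
  intro segs
  induction segs with
  | nil => intro c; simp [act]
  | cons q t ih =>
    intro c
    simp only [List.foldl_cons]
    rw [ih, act_cons]
    split_ifs <;> omega

lemma pvActiveB_eq (segs : List (Int × Int)) (x : Int) : pvActiveB segs x = act segs x := by
  unfold pvActiveB; rw [pvActiveB_go]; omega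

lemma psum_append (es fs : List (Int × Int)) : psum (es ++ fs) = psum es + psum fs := by
  simp [psum]

lemma actE_append (es fs : List (Int × Int)) (x : Int) :
    actE (es ++ fs) x = actE es x + actE fs x := by
  unfold actE; simp only [List.countP_append]; push_cast; ring

lemma actE_start_singleton (p x : Int) :
    actE [(p, 1)] x = (if p ≤ x then 1 else 0) := by
  unfold actE; by_cases h : p ≤ x <;> simp [h]

lemma actE_end_singleton (p x : Int) :
    actE [(p, -1)] x = -(if p < x then 1 else 0) := by
  unfold actE; by_cases h : p < x <;> simp [h]

-- ---------- events list: build and transfer ----------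

lemma ev_foldl (segs : List (Int × Int)) :
    ∀ acc : List (Int × Int),
      segs.foldl (fun acc lr => acc ++ [(lr.1, (1 : Int)), (lr.2, (-1 : Int))]) acc
        = acc ++ evOf segs := by
  induction segs with
  | nil => intro acc; simp [evOf]
  | cons q t ih =>
    intro acc
    simp only [List.foldl_cons]
    rw [ih]
    simp [evOf, List.flatMap_cons]

lemma actE_evOf (segs : List (Int × Int)) (x : Int) : actE (evOf segs) x = act segs x := by
  induction segs with
  | nil => simp [evOf, actE, act]
  | cons q t ih =>
    have : evOf (q :: t) = [(q.1, (1 : Int)), (q.2, (-1 : Int))] ++ evOf t := by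
      simp [evOf, List.flatMap_cons]
    rw [this, actE_append, ih, act_cons]
    have : actE [(q.1, (1:Int)), (q.2, (-1:Int))] x
        = (if q.1 ≤ x then 1 else 0) - (if q.2 < x then 1 else 0) := by
      have h2 : [(q.1, (1:Int)), (q.2, (-1:Int))] = [(q.1, (1:Int))] ++ [(q.2, (-1:Int))] := rfl
      rw [h2, actE_append, actE_start_singleton, actE_end_singleton]; ring
    rw [this]

lemma isStart_evOf (segs : List (Int × Int)) (x : Int) :
    isStart (evOf segs) x ↔ ∃ q ∈ segs, q.1 = x := by
  unfold isStart evOf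
  simp only [List.mem_flatMap, List.mem_cons, Prod.mk.injEq, List.not_mem_nil, or_false]
  constructor
  · rintro ⟨q, hq, ⟨h1, -⟩ | ⟨-, h2⟩⟩
    · exact ⟨q, hq, h1.symm⟩
    · omega
  · rintro ⟨q, hq, h1⟩
    exact ⟨q, hq, Or.inl ⟨h1.symm, trivial⟩⟩

lemma mem_evOf_snd (segs : List (Int × Int)) {e : Int × Int} (h : e ∈ evOf segs) :
    e.2 = 1 ∨ e.2 = -1 := by
  unfold evOf at h
  simp only [List.mem_flatMap, List.mem_cons] at h
  obtain ⟨q, _, h | h | h⟩ := h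
  · left; rw [h]
  · right; rw [h]
  · exact absurd h (List.not_mem_nil)

-- perm transfer
lemma actE_perm {es fs : List (Int × Int)} (h : es.Perm fs) (x : Int) : actE es x = actE fs x := by
  unfold actE; rw [h.countP_eq, h.countP_eq]

lemma isStart_perm {es fs : List (Int × Int)} (h : es.Perm fs) (x : Int) :
    isStart es x ↔ isStart fs x := by
  unfold isStart; exact h.mem_iff

-- ---------- sortedness of the event list ----------

lemma evLt_asymm {a b : Int × Int} (h : evLt a b = true) : evLt b a = false := by
  simp [evLt] at h ⊢; omega

lemma evLe_trans {a b c : Int × Int} (h1 : evLe a b) (h2 : evLe b c) : evLe a c := by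
  simp only [evLe] at *
  simp [evLt] at h1 h2 ⊢; omega

lemma insertBy_cons (r : (Int × Int) → (Int × Int) → Bool) (x y : Int × Int)
    (ys : List (Int × Int)) :
    PySem.List.insertBy r x (y :: ys)
      = if r x y then x :: y :: ys else y :: PySem.List.insertBy r x ys := rfl

lemma evLe_of_not_lt {a b : Int × Int} (h : evLt a b = false) : evLe b a := h

lemma pairwise_insertBy (x : Int × Int) :
    ∀ acc : List (Int × Int), acc.Pairwise evLe →
      (PySem.List.insertBy evLt x acc).Pairwise evLe := by
  intro acc
  induction acc with
  | nil => intro _; simp [PySem.List.insertBy]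
  | cons y ys ih =>
    intro hp
    rw [List.pairwise_cons] at hp
    obtain ⟨hy, hys⟩ := hp
    rw [insertBy_cons]
    by_cases hxy : evLt x y = true
    · rw [if_pos hxy]
      refine List.Pairwise.cons ?_ (List.Pairwise.cons hy hys)
      intro z hz
      rcases List.mem_cons.mp hz with h | h
      · subst h; exact evLt_asymm hxy
      · exact evLe_trans (evLt_asymm hxy) (hy z h)
    · have hxy' : evLt x y = false := by revert hxy; cases evLt x y <;> simp
      rw [if_neg (by simp [hxy'])]
      refine List.Pairwise.cons ?_ (ih hys)
      intro z hz
      rcases (PySem.List.mem_insertBy evLt x z ys).mp hz with h | h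
      · subst h; exact evLe_of_not_lt hxy'
      · exact hy z h
    
lemma pairwise_sorted2 (es : List (Int × Int)) :
    (PySem.List.sorted2 es (fun e => e.1) (fun e => -e.2)).Pairwise evLe := by
  show (es.foldl (fun acc x => PySem.List.insertBy evLt x acc) []).Pairwise evLe
  suffices h : ∀ (l : List (Int × Int)) (acc : List (Int × Int)), acc.Pairwise evLe →
      (l.foldl (fun acc x => PySem.List.insertBy evLt x acc) acc).Pairwise evLe by
    exact h es [] (by simp)
  intro l
  induction l with
  | nil => intro acc h; exact h
  | cons x t ih => intro acc h; exact ih _ (pairwise_insertBy x acc h)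

-- ---------- key coordinate facts from evLe ----------

lemma evLe_start_start {a : Int × Int} {p : Int} (h : evLe a (p, 1)) (h2 : a.2 = 1) : a.1 ≤ p := by
  simp only [evLe] at h
  simp [evLt] at h
  omega

lemma evLe_end_start {a : Int × Int} {p : Int} (h : evLe a (p, 1)) (h2 : a.2 = -1) : a.1 < p := by
  simp only [evLe] at h
  simp [evLt] at h
  omega

lemma evLe_any_end {a : Int × Int} {p : Int} (h : evLe a (p, -1)) (ha : a.2 = 1 ∨ a.2 = -1) :
    a.1 ≤ p := by
  simp only [evLe] at h
  simp [evLt] at h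
  omega

-- if every start is ≤ p and every end is < p then the active count at p is the plain sum
lemma actE_eq_psum {p : Int} :
    ∀ es : List (Int × Int), (∀ a ∈ es, a.2 = 1 ∨ a.2 = -1) →
      (∀ a ∈ es, a.2 = 1 → a.1 ≤ p) → (∀ a ∈ es, a.2 = -1 → a.1 < p) →
      actE es p = psum es := by
  intro es
  induction es with
  | nil => intro _ _ _; simp [actE, psum]
  | cons a t ih =>
    intro hpm hs he
    have ha := hpm a (List.mem_cons_self)
    have h1 : actE (a :: t) p = actE [a] p + actE t p := actE_append [a] t p
    have h2 : psum (a :: t) = a.2 + psum t := by simp [psum]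
    rw [h1, h2, ih (fun b hb => hpm b (List.mem_cons_of_mem _ hb))
      (fun b hb => hs b (List.mem_cons_of_mem _ hb))
      (fun b hb => he b (List.mem_cons_of_mem _ hb))]
    rcases ha with ha | ha
    · have := hs a (List.mem_cons_self) ha
      have e : ([a] : List (Int × Int)) = [(a.1, (1:Int))] := by
        cases a; simp_all
      rw [e, actE_start_singleton, if_pos this, ha]
    · have := he a (List.mem_cons_self) ha
      have e : ([a] : List (Int × Int)) = [(a.1, (-1:Int))] := by
        cases a; simp_all
      rw [e, actE_end_singleton, if_pos this, ha]

-- ---------- the A-side sweep invariant ----------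

def stepA (st : Int × Int × Option Int) (e : Int × Int) : Int × Int × Option Int :=
  let cur := st.2.1 + e.2
  if cur > st.1 then (cur, cur, some e.1) else (st.1, cur, st.2.2)

def StA (es : List (Int × Int)) (st : Int × Int × Option Int) : Prop :=
  st.2.1 = psum es ∧ 0 ≤ st.1 ∧ psum es ≤ st.1 ∧
    (∀ x, isStart es x → actE es x ≤ st.1) ∧
    ((st.1 = 0 ∧ st.2.2 = none) ∨
      (0 < st.1 ∧ ∃ x, st.2.2 = some x ∧ isStart es x ∧ actE es x = st.1 ∧
        ∀ y, isStart es y → actE es y = st.1 → x ≤ y))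

lemma isStart_append_start (es : List (Int × Int)) (p x : Int) :
    isStart (es ++ [(p, 1)]) x ↔ isStart es x ∨ x = p := by
  unfold isStart
  simp [List.mem_append, Prod.ext_iff]

lemma isStart_append_end (es : List (Int × Int)) (p x : Int) :
    isStart (es ++ [(p, -1)]) x ↔ isStart es x := by
  unfold isStart
  simp only [List.mem_append, List.mem_singleton, Prod.mk.injEq]
  constructor
  · rintro (h | ⟨h1, h2⟩)
    · exact h
    · omega
  · intro h; exact Or.inl h

lemma foldA_inv :
    ∀ es : List (Int × Int), es.Pairwise evLe → (∀ e ∈ es, e.2 = 1 ∨ e.2 = -1) →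
      StA es (es.foldl stepA (0, 0, none)) := by
  intro es
  induction es using List.reverseRecOn with
  | nil =>
    intro _ _
    refine ⟨by simp [psum], le_refl 0, by simp [psum], ?_, Or.inl ⟨rfl, rfl⟩⟩
    intro x hx; exact absurd hx (by simp [isStart])
  | append_singleton es e ih =>
    intro hp hm
    have hpes : es.Pairwise evLe := (List.pairwise_append.mp hp).1
    have hle : ∀ a ∈ es, evLe a e := by
      intro a ha
      exact (List.pairwise_append.mp hp).2.2 a ha e (List.mem_singleton_self e)
    have hmes : ∀ a ∈ es, a.2 = 1 ∨ a.2 = -1 := fun a ha => hm a (List.mem_append_left _ ha)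
    have he2 : e.2 = 1 ∨ e.2 = -1 := hm e (List.mem_append_right _ (List.mem_singleton_self e))
    have hst := ih hpes hmes
    set st := es.foldl stepA (0, 0, none) with hstdef
    obtain ⟨hcur, hm0, hps, hbound, hdisj⟩ := hst
    have hfold : (es ++ [e]).foldl stepA (0, 0, none) = stepA st e := by
      rw [hstdef]; simp [List.foldl_append]
    rw [hfold]
    obtain ⟨p, c⟩ := e
    rcases he2 with hc | hc
    · -- e is a start (p, 1)
      subst hc
      have hstart_le : ∀ a ∈ es, a.2 = 1 → a.1 ≤ p := fun a ha h2 =>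
        evLe_start_start (hle a ha) h2
      have hend_lt : ∀ a ∈ es, a.2 = -1 → a.1 < p := fun a ha h2 =>
        evLe_end_start (hle a ha) h2
      have hact : actE es p = psum es := actE_eq_psum es hmes hstart_le hend_lt
      have hpsum' : psum (es ++ [(p, 1)]) = psum es + 1 := by
        rw [psum_append]; simp [psum]
      have hactx : ∀ x, actE (es ++ [(p,1)]) x = actE es x + (if p ≤ x then 1 else 0) := by
        intro x; rw [actE_append, actE_start_singleton]
      have hstart_coord : ∀ x, isStart es x → x ≤ p := by
        intro x hx
        exact evLe_start_start (hle (x, 1) hx) rfl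
      unfold stepA
      simp only
      by_cases hgt : st.2.1 + 1 > st.1
      · rw [if_pos hgt]
        refine ⟨by simp [hpsum', hcur], by omega, by simp [hpsum', hcur], ?_, ?_⟩
        · intro x hx
          rcases (isStart_append_start es p x).mp hx with hx | hx
          · have hxp := hstart_coord x hx
            rcases lt_or_eq_of_le hxp with hlt | heq
            · rw [hactx, if_neg (by omega)]
              have := hbound x hx
              omega
            · subst heq
              rw [hactx, if_pos (le_refl _), hact]
              omega
          · subst hx
            rw [hactx, if_pos (le_refl _), hact]
            omega
        · refine Or.inr ⟨by omega, p, rfl, (isStart_append_start es p p).mpr (Or.inr rfl), ?_, ?_⟩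
          · rw [hactx, if_pos (le_refl _), hact]; omega
          · intro y hy hya
            rcases (isStart_append_start es p y).mp hy with hy | hy
            · have hyp := hstart_coord y hy
              rcases lt_or_eq_of_le hyp with hlt | heq
              · exfalso
                rw [hactx, if_neg (by omega)] at hya
                have := hbound y hy
                omega
              · omega
            · omega
      · rw [if_neg hgt]
        have hcase : ∀ x, isStart (es ++ [(p,1)]) x → actE (es ++ [(p,1)]) x ≤ st.1 := by
          intro x hx
          rcases (isStart_append_start es p x).mp hx with hx' | hx'
          · have hxp := hstart_coord x hx'
            rcases lt_or_eq_of_le hxp with hlt | heq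
            · rw [hactx, if_neg (by omega), add_zero]
              exact hbound x hx'
            · subst heq
              rw [hactx, if_pos (le_refl _), hact]
              omega
          · subst hx'
            rw [hactx, if_pos (le_refl _), hact]
            omega
        refine ⟨by simp [hpsum', hcur], hm0, by simp [hpsum', hcur]; omega, hcase, ?_⟩
        rcases hdisj with ⟨hz, hb⟩ | ⟨hpos, x0, hb, hx0s, hx0a, hx0min⟩
        · exact Or.inl ⟨hz, hb⟩
        · refine Or.inr ⟨hpos, x0, hb, (isStart_append_start es p x0).mpr (Or.inl hx0s), ?_, ?_⟩
          · have hx0p := hstart_coord x0 hx0s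
            rcases lt_or_eq_of_le hx0p with hlt | heq
            · rw [hactx, if_neg (by omega), add_zero]; exact hx0a
            · exfalso
              subst heq
              rw [hact] at hx0a
              omega
          · intro y hy hya
            rcases (isStart_append_start es p y).mp hy with hy' | hy'
            · have hyp := hstart_coord y hy'
              rcases lt_or_eq_of_le hyp with hlt | heq
              · rw [hactx, if_neg (by omega), add_zero] at hya
                exact hx0min y hy' hya
              · subst heq
                exact hstart_coord x0 hx0s
            · subst hy'
              exact hstart_coord x0 hx0s
    · -- e is an end (p, -1)
      subst hc
      have hcoord_le : ∀ a ∈ es, a.1 ≤ p := fun a ha =>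
        evLe_any_end (hle a ha) (hmes a ha)
      have hpsum' : psum (es ++ [(p, -1)]) = psum es - 1 := by
        rw [psum_append]; simp [psum]; ring
      have hactx : ∀ x, x ≤ p → actE (es ++ [(p,-1)]) x = actE es x := by
        intro x hx
        rw [actE_append, actE_end_singleton, if_neg (by omega)]
        ring
      have hstart_coord : ∀ x, isStart es x → x ≤ p := fun x hx => hcoord_le (x, 1) hx
      unfold stepA
      simp only
      have hngt : ¬ (st.2.1 + (-1) > st.1) := by omega
      rw [if_neg hngt]
      refine ⟨by simp [hpsum', hcur]; ring, hm0, by simp [hpsum', hcur]; omega, ?_, ?_⟩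
      · intro x hx
        have hx' := (isStart_append_end es p x).mp hx
        rw [hactx x (hstart_coord x hx')]
        exact hbound x hx'
      · rcases hdisj with ⟨hz, hb⟩ | ⟨hpos, x0, hb, hx0s, hx0a, hx0min⟩
        · exact Or.inl ⟨hz, hb⟩
        · refine Or.inr ⟨hpos, x0, hb, (isStart_append_end es p x0).mpr hx0s, ?_, ?_⟩
          · rw [hactx x0 (hstart_coord x0 hx0s)]; exact hx0a
          · intro y hy hya
            have hy' := (isStart_append_end es p y).mp hy
            rw [hactx y (hstart_coord y hy')] at hya
            exact hx0min y hy' hya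

-- A's result satisfies the characterisation
lemma charA (segs : List (Int × Int)) :
    CharRes segs (max_segments_cover segs).1 (max_segments_cover segs).2 := by
  have hev : segs.foldl (fun acc lr => acc ++ [(lr.1, (1 : Int)), (lr.2, (-1 : Int))]) []
      = evOf segs := by
    rw [ev_foldl]; simp
  have hperm : (PySem.List.sorted2 (evOf segs) (fun e => e.1) (fun e => -e.2)).Perm (evOf segs) :=
    PySem.List.sorted2_perm _ _ _ _
  set es := PySem.List.sorted2 (evOf segs) (fun e => e.1) (fun e => -e.2) with hes
  have hpw : es.Pairwise evLe := pairwise_sorted2 _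
  have hmem : ∀ e ∈ es, e.2 = 1 ∨ e.2 = -1 := fun e he =>
    mem_evOf_snd segs (hperm.mem_iff.mp he)
  have hst := foldA_inv es hpw hmem
  have hres : max_segments_cover segs = ((es.foldl stepA (0,0,none)).2.2,
      (es.foldl stepA (0,0,none)).1) := by
    unfold max_segments_cover
    rw [hev]
    rfl
  set st := es.foldl stepA (0, 0, none) with hstdef
  obtain ⟨_, hm0, _, hbound, hdisj⟩ := hst
  rw [hres]
  refine ⟨hm0, ?_, ?_⟩
  · intro q hq
    have hs : isStart es q.1 := by
      rw [isStart_perm hperm, isStart_evOf]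
      exact ⟨q, hq, rfl⟩
    have := hbound q.1 hs
    rwa [actE_perm hperm, actE_evOf] at this
  · rcases hdisj with ⟨hz, hb⟩ | ⟨hpos, x0, hb, hx0s, hx0a, hx0min⟩
    · exact Or.inl ⟨hz, hb⟩
    · refine Or.inr ⟨hpos, x0, hb, ?_, ?_, ?_⟩
      · rw [isStart_perm hperm, isStart_evOf] at hx0s
        exact hx0s
      · rw [actE_perm hperm, actE_evOf] at hx0a
        exact hx0a
      · intro q hq hqa
        refine hx0min q.1 ?_ ?_
        · rw [isStart_perm hperm, isStart_evOf]
          exact ⟨q, hq, rfl⟩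
        · rw [actE_perm hperm, actE_evOf]
          exact hqa

-- ---------- the B-side invariant ----------

def stepB (segs : List (Int × Int)) (st : Option Int × Int) (q : Int × Int) : Option Int × Int :=
  let c := pvActiveB segs q.1
  if c > st.2 then (some q.1, c)
  else
    match st.1 with
    | some bp => if c = st.2 ∧ q.1 < bp then (some q.1, st.2) else st
    | none => st

def StB (segs us : List (Int × Int)) (st : Option Int × Int) : Prop :=
  0 ≤ st.2 ∧ (∀ q ∈ us, act segs q.1 ≤ st.2) ∧
    ((st.2 = 0 ∧ st.1 = none) ∨
      (0 < st.2 ∧ ∃ x, st.1 = some x ∧ (∃ q ∈ us, q.1 = x) ∧ act segs x = st.2 ∧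
        ∀ q ∈ us, act segs q.1 = st.2 → x ≤ q.1))

lemma stepB_inv (segs us : List (Int × Int)) (st : Option Int × Int) (q : Int × Int)
    (h : StB segs us st) : StB segs (us ++ [q]) (stepB segs st q) := by
  obtain ⟨b, m⟩ := st
  obtain ⟨hm0, hbound, hdisj⟩ := h
  simp only at hm0 hbound hdisj
  unfold stepB
  rw [pvActiveB_eq]
  simp only
  by_cases hgt : act segs q.1 > m
  · rw [if_pos hgt]
    refine ⟨by simp; omega, ?_, ?_⟩
    · intro r hr
      rcases List.mem_append.mp hr with hr | hr
      · have := hbound r hr; simp; omega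
      · rw [List.mem_singleton.mp hr]
    · refine Or.inr ⟨by simp; omega, q.1, rfl,
        ⟨q, List.mem_append_right _ (List.mem_singleton_self q), rfl⟩, rfl, ?_⟩
      intro r hr hra
      rcases List.mem_append.mp hr with hr | hr
      · exfalso; have := hbound r hr; simp at hra; omega
      · rw [List.mem_singleton.mp hr]
  · rw [if_neg hgt]
    rcases hdisj with ⟨hz, hb⟩ | ⟨hpos, x0, hb, ⟨r0, hr0, hr0e⟩, hx0a, hx0min⟩
    · subst hb
      refine ⟨hm0, ?_, Or.inl ⟨hz, rfl⟩⟩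
      intro r hr
      rcases List.mem_append.mp hr with hr | hr
      · exact hbound r hr
      · rw [List.mem_singleton.mp hr]; simp; omega
    · subst hb
      simp only
      by_cases hupd : act segs q.1 = m ∧ q.1 < x0
      · rw [if_pos hupd]
        refine ⟨hm0, ?_, ?_⟩
        · intro r hr
          rcases List.mem_append.mp hr with hr | hr
          · exact hbound r hr
          · rw [List.mem_singleton.mp hr]; simp; omega
        · refine Or.inr ⟨hpos, q.1, rfl,
            ⟨q, List.mem_append_right _ (List.mem_singleton_self q), rfl⟩, hupd.1, ?_⟩
          intro r hr hra
          rcases List.mem_append.mp hr with hr | hr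
          · have := hx0min r hr hra; omega
          · rw [List.mem_singleton.mp hr]
      · rw [if_neg hupd]
        refine ⟨hm0, ?_, ?_⟩
        · intro r hr
          rcases List.mem_append.mp hr with hr | hr
          · exact hbound r hr
          · rw [List.mem_singleton.mp hr]; simp; omega
        · refine Or.inr ⟨hpos, x0, rfl, ⟨r0, List.mem_append_left _ hr0, hr0e⟩, hx0a, ?_⟩
          intro r hr hra
          rcases List.mem_append.mp hr with hr | hr
          · exact hx0min r hr hra
          · rw [List.mem_singleton.mp hr]
            rw [List.mem_singleton.mp hr] at hra
            by_cases hlt : q.1 < x0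
            · exact absurd ⟨hra, hlt⟩ hupd
            · omega

lemma foldB_inv (segs : List (Int × Int)) :
    ∀ (ts us : List (Int × Int)) (st : Option Int × Int), StB segs us st →
      StB segs (us ++ ts) (ts.foldl (stepB segs) st) := by
  intro ts
  induction ts with
  | nil => intro us st h; simpa using h
  | cons q t ih =>
    intro us st h
    have h1 := stepB_inv segs us st q h
    have h2 := ih (us ++ [q]) _ h1
    simpa [List.append_assoc] using h2

lemma charB (segs : List (Int × Int)) :
    CharRes segs (max_segments_cover_alt segs).1 (max_segments_cover_alt segs).2 := by
  have hfold : max_segments_cover_alt segs = segs.foldl (stepB segs) (none, 0) := rfl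
  have h0 : StB segs [] (none, 0) := by
    refine ⟨le_refl 0, ?_, Or.inl ⟨rfl, rfl⟩⟩
    intro q hq; exact absurd hq (List.not_mem_nil)
  have h := foldB_inv segs segs [] (none, 0) h0
  rw [List.nil_append] at h
  rw [hfold]
  exact h

-- ===== VERDICT (by name: the statement is the Claim_ definition above) =====
theorem max_segments_cover_spec : Claim_equal_max_segments_cover := by
  intro segs _
  unfold Spec_max_segments_cover
  have h := CharRes_unique (charA segs) (charB segs)
  exact Prod.ext h.1 h.2
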